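-- pv_equiv track=rewrite | github.com/Pandaemonium/CausalOctonionGraph | cog_v2/calc/build_theta002_exact_microstate_domains_v1.py | _eventual_period
-- ===== SOURCE A (Python) =====
-- from typing import Any, Dict, List, Mapping, Sequence, Tuple
--
-- def _eventual_period(seq: Sequence[Tuple[int, ...]]) -> Dict[str, int | None]:
--     n = len(seq)
--     if n <= 1:
--         return {"preperiod": 0, "period": None}
--     for pre in range(n - 1):
--         max_p = n - pre - 1
--         for p in range(1, max_p + 1):
--             ok = True
--             for i in range(pre + p, n):
--                 if seq[i] != seq[i - p]:
--                     ok = False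
--                     break
--             if ok:
--                 return {"preperiod": int(pre), "period": int(p)}
--     return {"preperiod": None, "period": None}
-- ===== SOURCE B (Python) =====
-- def _eventual_period(seq):
--     n = len(seq)
--     if n <= 1:
--         return {"preperiod": 0, "period": None}
--     best_pre = None
--     best_p = None
--     for p in range(1, n):
--         # minimal preperiod for shift p: scan from the top for the largest mismatch
--         pre = 0
--         for i in range(n - 1, p - 1, -1):
--             if seq[i] != seq[i - p]:
--                 pre = i - p + 1
--                 break
--         if pre + p < n and (best_pre is None or pre < best_pre):
--             best_pre, best_p = pre, p
--             if pre == 0: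
--                 break
--     if best_pre is None:
--         return {"preperiod": None, "period": None}
--     return {"preperiod": best_pre, "period": best_p}
-- ===== Notes on version B (the rewrite author's own statement) =====
-- stated objective: faster
-- what changed: A scans preperiods outermost and re-verifies every (preperiod, period) pair with an inner index loop (triple loop); B loops over the shift p only, finds the minimal preperiod for each p by a single right-to-left scan to the topmost mismatch, and keeps the lexicographically best candidate, breaking early once preperiod 0 is found.
import Mathlib
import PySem

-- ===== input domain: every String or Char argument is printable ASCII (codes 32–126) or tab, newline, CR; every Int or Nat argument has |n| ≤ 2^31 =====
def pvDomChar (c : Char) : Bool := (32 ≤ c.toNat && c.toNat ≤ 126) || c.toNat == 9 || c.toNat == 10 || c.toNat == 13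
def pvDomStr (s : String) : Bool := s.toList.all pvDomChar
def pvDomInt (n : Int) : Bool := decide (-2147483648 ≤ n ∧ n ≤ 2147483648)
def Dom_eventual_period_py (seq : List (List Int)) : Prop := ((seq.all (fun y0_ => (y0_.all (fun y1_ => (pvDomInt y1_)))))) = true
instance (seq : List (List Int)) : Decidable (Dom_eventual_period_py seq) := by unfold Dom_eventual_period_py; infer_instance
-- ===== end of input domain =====

-- B replaces A's preperiod-major triple loop by a shift-major double loop: for each shift p it
-- finds the minimal preperiod by one right-to-left scan and keeps the lexicographically best
-- candidate (objective: faster).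

-- ===== PORT A =====
-- inner loop 'for i in range(pre + p, n)' with early break; fuel = number of remaining indices
def epA_ok (seq : List (List Int)) (p : Nat) : Nat → Nat → Bool
  | _, 0 => true
  | i, c+1 => if seq.getD i [] ≠ seq.getD (i - p) [] then false else epA_ok seq p (i+1) c

-- middle loop 'for p in range(1, max_p + 1)'; fuel = number of remaining p values
def epA_ploop (seq : List (List Int)) (n pre : Nat) : Nat → Nat → Option (Nat × Nat)
  | _, 0 => none
  | p, c+1 =>
    if epA_ok seq p (pre + p) (n - (pre + p)) then some (pre, p)
    else epA_ploop seq n pre (p+1) c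

-- outer loop 'for pre in range(n - 1)'
def epA_preloop (seq : List (List Int)) (n : Nat) : Nat → Nat → Option (Nat × Nat)
  | _, 0 => none
  | pre, c+1 =>
    match epA_ploop seq n pre 1 (n - pre - 1) with
    | some r => some r
    | none => epA_preloop seq n (pre+1) c

def eventual_period_py (seq : List (List Int)) : List (String × Option Int) :=
  if seq.length ≤ 1 then [("preperiod", some 0), ("period", none)]
  else
    match epA_preloop seq seq.length 0 (seq.length - 1) with
    | some (pre, p) => [("preperiod", some (pre : Int)), ("period", some (p : Int))]
    | none => [("preperiod", none), ("period", none)]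

-- ===== PORT B =====
-- 'best_pre is None or pre < best_pre'
def epB_better (pre : Nat) (best : Option (Nat × Nat)) : Bool :=
  match best with
  | none => true
  | some (bq, _) => decide (pre < bq)

-- 'for i in range(n - 1, p - 1, -1)' scanning for the topmost mismatch; fuel = number of indices
def epB_scan (seq : List (List Int)) (p : Nat) : Nat → Nat → Nat
  | _, 0 => 0
  | i, c+1 => if seq.getD i [] ≠ seq.getD (i - p) [] then i - p + 1 else epB_scan seq p (i-1) c

-- 'for p in range(1, n)' keeping the lexicographically best (pre, p); breaks once pre = 0
def epB_loop (seq : List (List Int)) (n : Nat) : Nat → Nat → Option (Nat × Nat) → Option (Nat × Nat)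
  | _, 0, best => best
  | p, c+1, best =>
    let pre := epB_scan seq p (n-1) (n-p)
    if pre + p < n ∧ epB_better pre best = true then
      (if pre = 0 then some (pre, p) else epB_loop seq n (p+1) c (some (pre, p)))
    else epB_loop seq n (p+1) c best

def eventual_period_py_alt (seq : List (List Int)) : List (String × Option Int) :=
  if seq.length ≤ 1 then [("preperiod", some 0), ("period", none)]
  else
    match epB_loop seq seq.length 1 (seq.length - 1) none with
    | some (pre, p) => [("preperiod", some (pre : Int)), ("period", some (p : Int))]
    | none => [("preperiod", none), ("period", none)]

-- ===== PRECONDITION & SPEC =====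
def Spec_eventual_period_py (seq : List (List Int)) (out : List (String × Option Int)) : Prop := out = eventual_period_py_alt seq
instance (seq : List (List Int)) (out : List (String × Option Int)) : Decidable (Spec_eventual_period_py seq out) := by unfold Spec_eventual_period_py; infer_instance

-- ===== CLAIM (what is proved, stated in full; the proofs are below) =====
def Claim_equal_eventual_period_py : Prop := ∀ (seq : List (List Int)), Dom_eventual_period_py seq → Spec_eventual_period_py seq (eventual_period_py seq)

-- ===== LEMMAS AND PROOFS =====

-- 'seq[j] == seq[j-p]'
def pvEqa (seq : List (List Int)) (p j : Nat) : Prop := seq.getD j [] = seq.getD (j - p) []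

-- preperiod pre works for shift p
def pvOk (seq : List (List Int)) (n p pre : Nat) : Prop := ∀ j, pre + p ≤ j → j < n → pvEqa seq p j

-- (pre, p) is a valid candidate exactly as A's loop ranges admit it
def pvGood (seq : List (List Int)) (n pre p : Nat) : Prop := 1 ≤ p ∧ pre + p < n ∧ pvOk seq n p pre

-- r is the lexicographically least valid candidate (pre-major), or none if there is none
def pvIsRes (seq : List (List Int)) (n : Nat) : Option (Nat × Nat) → Prop
  | none => ∀ pre p, ¬ pvGood seq n pre p
  | some (pre, p) => pvGood seq n pre p ∧ ∀ q q', pvGood seq n q q' → pre < q ∨ (pre = q ∧ p ≤ q')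

theorem pvIsRes_unique (seq : List (List Int)) (n : Nat) (r r' : Option (Nat × Nat))
    (h : pvIsRes seq n r) (h' : pvIsRes seq n r') : r = r' := by
  match r, r' with
  | none, none => rfl
  | none, some (q, p) => exact absurd h'.1 (h q p)
  | some (q, p), none => exact absurd h.1 (h' q p)
  | some (q, p), some (q', p') =>
    obtain ⟨g, m⟩ := h; obtain ⟨g', m'⟩ := h'
    have h1 := m q' p' g'
    have h2 := m' q p g
    simp only [Option.some.injEq, Prod.mk.injEq]
    omega

theorem epA_ok_iff (seq : List (List Int)) (p : Nat) :
    ∀ c i, (epA_ok seq p i c = true ↔ ∀ j, i ≤ j → j < i + c → pvEqa seq p j) := by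
  intro c
  induction c with
  | zero =>
    intro i
    simp only [epA_ok]
    constructor
    · intro _ j h1 h2; omega
    · intro _; trivial
  | succ c ih =>
    intro i
    by_cases hm : seq.getD i [] = seq.getD (i - p) []
    · have hs : epA_ok seq p i (c+1) = epA_ok seq p (i+1) c := by
        simp only [epA_ok]
        rw [if_neg (not_not_intro hm)]
      rw [hs, ih]
      constructor
      · intro h j h1 h2
        rcases Nat.eq_or_lt_of_le h1 with rfl | h1'
        · exact hm
        · exact h j h1' (by omega)
      · intro h j h1 h2
        exact h j (by omega) (by omega)
    · have hs : epA_ok seq p i (c+1) = false := by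
        simp only [epA_ok]
        rw [if_pos hm]
      rw [hs]
      constructor
      · intro h; exact absurd h (by simp)
      · intro h
        exact absurd (h i (le_refl i) (by omega)) hm

theorem epA_ploop_char (seq : List (List Int)) (n pre : Nat) :
    ∀ c p, pre + p + c = n →
      ((∀ r, epA_ploop seq n pre p c = some r →
          r.1 = pre ∧ p ≤ r.2 ∧ pre + r.2 < n ∧ pvOk seq n r.2 pre ∧
          ∀ p', p ≤ p' → p' < r.2 → ¬ pvOk seq n p' pre)
       ∧ (epA_ploop seq n pre p c = none → ∀ p', p ≤ p' → p' < p + c → ¬ pvOk seq n p' pre)) := by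
  intro c
  induction c with
  | zero =>
    intro p hpc
    constructor
    · intro r hr; exact absurd hr (by simp [epA_ploop])
    · intro _ p' h1 h2; omega
  | succ c ih =>
    intro p hpc
    have harith : pre + p + (n - (pre + p)) = n := by omega
    have hiff : epA_ok seq p (pre + p) (n - (pre + p)) = true ↔ pvOk seq n p pre := by
      rw [epA_ok_iff]
      unfold pvOk
      constructor
      · intro h j h1 h2; exact h j h1 (by omega)
      · intro h j h1 h2; exact h j h1 (by omega)
    by_cases hok : pvOk seq n p pre
    · have hb : epA_ok seq p (pre + p) (n - (pre + p)) = true := hiff.mpr hok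
      have hs : epA_ploop seq n pre p (c+1) = some (pre, p) := by
        simp [epA_ploop, hb]
      constructor
      · intro r hr
        rw [hs] at hr
        injection hr with hr
        subst hr
        exact ⟨rfl, le_refl p, by omega, hok, by intro p' h1 h2; omega⟩
      · intro hr; rw [hs] at hr; exact absurd hr (by simp)
    · have hb : epA_ok seq p (pre + p) (n - (pre + p)) = false := by
        cases hb' : epA_ok seq p (pre + p) (n - (pre + p)) with
        | true => exact absurd (hiff.mp hb') hok
        | false => rfl
      have hs : epA_ploop seq n pre p (c+1) = epA_ploop seq n pre (p+1) c := by
        simp [epA_ploop, hb]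
      have hih := ih (p+1) (by omega)
      constructor
      · intro r hr
        rw [hs] at hr
        obtain ⟨e1, e2, e3, e4, e5⟩ := hih.1 r hr
        refine ⟨e1, by omega, e3, e4, ?_⟩
        intro p' h1 h2
        rcases Nat.eq_or_lt_of_le h1 with rfl | h1'
        · exact hok
        · exact e5 p' h1' h2
      · intro hr p' h1 h2
        rw [hs] at hr
        rcases Nat.eq_or_lt_of_le h1 with rfl | h1'
        · exact hok
        · exact hih.2 hr p' h1' (by omega)

theorem epA_preloop_spec (seq : List (List Int)) (n : Nat) :
    ∀ c pre, pre + c + 1 = n → (∀ q p, q < pre → ¬ pvGood seq n q p) →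
      pvIsRes seq n (epA_preloop seq n pre c) := by
  intro c
  induction c with
  | zero =>
    intro pre h hinv
    show ∀ q p, ¬ pvGood seq n q p
    intro q p hg
    have hq : q < pre := by obtain ⟨h1, h2, _⟩ := hg; omega
    exact hinv q p hq hg
  | succ c ih =>
    intro pre h hinv
    have hchar := epA_ploop_char seq n pre (n - pre - 1) 1 (by omega)
    cases hres : epA_ploop seq n pre 1 (n - pre - 1) with
    | some r =>
      obtain ⟨rq, rp⟩ := r
      obtain ⟨e1, e2, e3, e4, e5⟩ := hchar.1 (rq, rp) hres
      simp only at e1 e2 e3 e4 e5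
      subst e1
      have hs : epA_preloop seq n rq (c+1) = some (rq, rp) := by
        simp [epA_preloop, hres]
      rw [hs]
      refine ⟨⟨by omega, e3, e4⟩, ?_⟩
      intro q q' hg
      rcases lt_trichotomy q rq with hlt | rfl | hgt
      · exact absurd hg (hinv q q' hlt)
      · obtain ⟨g1, g2, g3⟩ := hg
        by_contra hc
        push_neg at hc
        exact e5 q' g1 (by omega) g3
      · left; exact hgt
    | none =>
      have hnone := hchar.2 hres
      have hs : epA_preloop seq n pre (c+1) = epA_preloop seq n (pre+1) c := by
        simp [epA_preloop, hres]
      rw [hs]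
      apply ih (pre+1) (by omega)
      intro q p hq hg
      rcases Nat.lt_succ_iff_lt_or_eq.mp hq with h' | rfl
      · exact hinv q p h' hg
      · obtain ⟨g1, g2, g3⟩ := hg
        exact hnone p g1 (by omega) g3

theorem epB_scan_spec (seq : List (List Int)) (p : Nat) (hp : 1 ≤ p) :
    ∀ c i, p + c ≤ i + 1 →
      ((∀ j, j ≤ i → i < j + c → epB_scan seq p i c + p ≤ j → pvEqa seq p j)
       ∧ (epB_scan seq p i c = 0 ∨
          ∃ j, j ≤ i ∧ i < j + c ∧ p ≤ j ∧ epB_scan seq p i c = j - p + 1 ∧ ¬ pvEqa seq p j)) := by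
  intro c
  induction c with
  | zero =>
    intro i _
    constructor
    · intro j h1 h2; omega
    · left; rfl
  | succ c ih =>
    intro i h
    by_cases hm : seq.getD i [] = seq.getD (i - p) []
    · have hs : epB_scan seq p i (c+1) = epB_scan seq p (i-1) c := by
        simp only [epB_scan]
        rw [if_neg (not_not_intro hm)]
      have hih := ih (i-1) (by omega)
      rw [hs]
      constructor
      · intro j h1 h2 h3
        rcases Nat.eq_or_lt_of_le h1 with rfl | hlt
        · exact hm
        · exact hih.1 j (by omega) (by omega) h3
      · rcases hih.2 with h0 | ⟨j, hj1, hj2, hj3, hj4, hj5⟩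
        · left; exact h0
        · right; exact ⟨j, by omega, by omega, hj3, hj4, hj5⟩
    · have hs : epB_scan seq p i (c+1) = i - p + 1 := by
        simp only [epB_scan]
        rw [if_pos hm]
      rw [hs]
      constructor
      · intro j h1 h2 h3; omega
      · right; exact ⟨i, le_refl i, by omega, by omega, by omega, hm⟩

theorem epB_pre_spec (seq : List (List Int)) (n p : Nat) (hp : 1 ≤ p) (hpn : p < n) :
    pvOk seq n p (epB_scan seq p (n-1) (n-p)) ∧
    ∀ q, pvOk seq n p q → epB_scan seq p (n-1) (n-p) ≤ q := by
  have h := epB_scan_spec seq p hp (n - p) (n-1) (by omega)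
  constructor
  · intro j h1 h2
    exact h.1 j (by omega) (by omega) h1
  · intro q hq
    rcases h.2 with h0 | ⟨j, hj1, hj2, hj3, hj4, hj5⟩
    · omega
    · by_contra hc
      push_neg at hc
      exact hj5 (hq j (by omega) (by omega))

-- loop invariant: best is the lexicographically least candidate among shifts < p (with nonzero
-- preperiod, since a zero preperiod breaks the loop), or none if there is none
def pvInv (seq : List (List Int)) (n p : Nat) : Option (Nat × Nat) → Prop
  | none => ∀ q p', 1 ≤ p' → p' < p → ¬ pvGood seq n q p'
  | some (bq, bp) => pvGood seq n bq bp ∧ 1 ≤ bq ∧ bp < p ∧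
      ∀ q p', 1 ≤ p' → p' < p → pvGood seq n q p' → bq < q ∨ (bq = q ∧ bp ≤ p')

theorem epB_loop_spec (seq : List (List Int)) (n : Nat) :
    ∀ c p best, p + c = n → 1 ≤ p → pvInv seq n p best →
      pvIsRes seq n (epB_loop seq n p c best) := by
  intro c
  induction c with
  | zero =>
    intro p best h hp hinv
    cases best with
    | none =>
      show ∀ q p', ¬ pvGood seq n q p'
      intro q p' hg
      exact hinv q p' hg.1 (by have := hg.2.1; omega) hg
    | some b =>
      obtain ⟨bq, bp⟩ := b
      obtain ⟨i1, i2, i3, i4⟩ := hinv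
      refine ⟨i1, ?_⟩
      intro q q' hg
      exact i4 q q' hg.1 (by have := hg.2.1; omega) hg
  | succ c ih =>
    intro p best h hp hinv
    have hpn : p < n := by omega
    have hspec := epB_pre_spec seq n p hp hpn
    have hloop : epB_loop seq n p (c+1) best =
        (if epB_scan seq p (n-1) (n-p) + p < n ∧ epB_better (epB_scan seq p (n-1) (n-p)) best = true then
          (if epB_scan seq p (n-1) (n-p) = 0 then some (epB_scan seq p (n-1) (n-p), p)
           else epB_loop seq n (p+1) c (some (epB_scan seq p (n-1) (n-p), p)))
         else epB_loop seq n (p+1) c best) := rfl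
    set r := epB_scan seq p (n-1) (n-p) with hr
    rw [hloop]
    by_cases h1 : r + p < n ∧ epB_better r best = true
    · rw [if_pos h1]
      have hgoodrp : pvGood seq n r p := ⟨hp, h1.1, hspec.1⟩
      by_cases h0 : r = 0
      · rw [if_pos h0]
        refine ⟨hgoodrp, ?_⟩
        intro q q' hg
        obtain ⟨g1, g2, g3⟩ := hg
        rcases lt_trichotomy q' p with hlt | rfl | hgt
        · -- q' < p: the previous best would have been at least as good, but it has bq > r = 0
          cases hbest : best with
          | none =>
            rw [hbest] at hinv
            exact absurd ⟨g1, g2, g3⟩ (hinv q q' g1 hlt)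
          | some b =>
            obtain ⟨bq, bp⟩ := b
            rw [hbest] at hinv h1
            obtain ⟨_, i2, _, i4⟩ := hinv
            have hbetter : r < bq := by
              have := h1.2
              simp [epB_better] at this
              exact this
            have := i4 q q' g1 hlt ⟨g1, g2, g3⟩
            left; omega
        · have := hspec.2 q g3
          rcases Nat.eq_or_lt_of_le this with h' | h'
          · right; omega
          · left; omega
        · rcases Nat.eq_zero_or_pos q with rfl | hq
          · right; omega
          · left; omega
      · rw [if_neg h0]
        apply ih (p+1) (some (r, p)) (by omega) (by omega)
        refine ⟨hgoodrp, by omega, by omega, ?_⟩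
        intro q p' h1' h2' hg
        rcases Nat.lt_succ_iff_lt_or_eq.mp h2' with hlt | rfl
        · cases hbest : best with
          | none =>
            rw [hbest] at hinv
            exact absurd hg (hinv q p' h1' hlt)
          | some b =>
            obtain ⟨bq, bp⟩ := b
            rw [hbest] at hinv h1
            obtain ⟨_, i2, _, i4⟩ := hinv
            have hbetter : r < bq := by
              have := h1.2
              simp [epB_better] at this
              exact this
            have := i4 q p' h1' hlt hg
            left; omega
        · obtain ⟨g1, g2, g3⟩ := hg
          have := hspec.2 q g3
          rcases Nat.eq_or_lt_of_le this with h' | h'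
          · right; omega
          · left; omega
    · rw [if_neg h1]
      apply ih (p+1) best (by omega) (by omega)
      -- extend the invariant to shifts < p + 1
      have hnotp : ∀ q, pvGood seq n q p →
          (∃ bq bp, best = some (bq, bp) ∧ bq ≤ r) := by
        intro q hg
        obtain ⟨g1, g2, g3⟩ := hg
        have hmin := hspec.2 q g3
        have hrn : r + p < n := by omega
        cases hbest : best with
        | none =>
          exfalso
          apply h1
          rw [hbest]
          exact ⟨hrn, rfl⟩
        | some b =>
          obtain ⟨bq, bp⟩ := b
          refine ⟨bq, bp, rfl, ?_⟩
          by_contra hc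
          push_neg at hc
          apply h1
          rw [hbest]
          refine ⟨hrn, ?_⟩
          simp [epB_better]
          omega
      cases hbest : best with
      | none =>
        rw [hbest] at hinv
        show ∀ q p', 1 ≤ p' → p' < p + 1 → ¬ pvGood seq n q p'
        intro q p' hp' h2' hg
        rcases Nat.lt_succ_iff_lt_or_eq.mp h2' with hlt | rfl
        · exact hinv q p' hp' hlt hg
        · obtain ⟨bq, bp, hb, _⟩ := hnotp q hg
          rw [hbest] at hb
          exact absurd hb (by simp)
      | some b =>
        obtain ⟨bq, bp⟩ := b
        rw [hbest] at hinv
        obtain ⟨i1, i2, i3, i4⟩ := hinv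
        refine ⟨i1, i2, by omega, ?_⟩
        intro q p' hp' h2' hg
        rcases Nat.lt_succ_iff_lt_or_eq.mp h2' with hlt | rfl
        · exact i4 q p' hp' hlt hg
        · obtain ⟨bq', bp', hb, hle⟩ := hnotp q hg
          rw [hbest] at hb
          injection hb with hb
          injection hb with hb1 hb2
          subst hb1; subst hb2
          have hmin := hspec.2 q hg.2.2
          rcases Nat.eq_or_lt_of_le (le_trans hle hmin) with h' | h'
          · right; exact ⟨h', by omega⟩
          · left; exact h'

-- ===== VERDICT (by name: the statement is the Claim_ definition above) =====
theorem eventual_period_py_spec : Claim_equal_eventual_period_py := by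
  intro seq _
  unfold Spec_eventual_period_py eventual_period_py eventual_period_py_alt
  by_cases hn : seq.length ≤ 1
  · rw [if_pos hn, if_pos hn]
  · rw [if_neg hn, if_neg hn]
    have hA := epA_preloop_spec seq seq.length (seq.length - 1) 0 (by omega)
      (by intro q p hq; exact absurd hq (by omega))
    have hB := epB_loop_spec seq seq.length (seq.length - 1) 1 none (by omega) (by omega)
      (by intro q p' h1 h2; exact absurd h2 (by omega))
    rw [pvIsRes_unique seq seq.length _ _ hA hB]
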